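-- pv_equiv track=rewrite | github.com/tanhoang0710/python-practise | BalancingString.py | check
-- ===== SOURCE A (Python) =====
-- def check(s):
--     reversed_s = s[::-1]  # dao nguoc 1 xau
--     a1 = [str(ord(c)) for c in s]  # chuyen ve ma ascci
--     a2 = [str(ord(c)) for c in reversed_s]
--     for i in range(1, len(a1)):
--         res1 = abs(int(a1[i]) - int(a1[i-1]))
--         res2 = abs(int(a2[i]) - int(a2[i-1]))
--         if res2 != res1:
--             return False
--     return True
-- ===== SOURCE B (Python) =====
-- def check(s):
--     i, j = 0, len(s) - 1
--     while i < j: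
--         if abs(ord(s[i + 1]) - ord(s[i])) != abs(ord(s[j]) - ord(s[j - 1])):
--             return False
--         i += 1
--         j -= 1
--     return True
-- ===== Notes on version B (the rewrite author's own statement) =====
-- stated objective: alternative
-- what changed: B replaces A's construction of a reversed string plus two parallel str(ord)/int arrays scanned over the full index range by an in-place two-pointer loop that walks the original string from both ends inward, comparing the left adjacent ASCII difference with the mirrored right one and stopping at the middle, so no auxiliary list is built and only half the positions are examined.
import Mathlib
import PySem

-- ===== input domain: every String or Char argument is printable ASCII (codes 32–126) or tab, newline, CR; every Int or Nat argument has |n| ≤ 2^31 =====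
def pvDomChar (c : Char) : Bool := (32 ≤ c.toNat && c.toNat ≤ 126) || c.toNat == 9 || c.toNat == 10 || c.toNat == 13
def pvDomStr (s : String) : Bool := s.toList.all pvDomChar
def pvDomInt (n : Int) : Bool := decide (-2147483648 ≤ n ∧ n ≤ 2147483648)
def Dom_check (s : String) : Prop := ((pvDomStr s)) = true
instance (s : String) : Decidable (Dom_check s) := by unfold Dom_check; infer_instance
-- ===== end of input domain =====

-- B replaces A's reversed string + two parallel str(ord)/int arrays scanned over all indices
-- by a two-pointer loop walking the original string inward from both ends (no auxiliary lists,
-- only half the positions examined).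

-- ===== PORT A =====
-- the 'for i in range(1, len(a1))' loop with early 'return False';
-- a1[i]/a2[i] are always in range here and int() always parses (entries are str(ord(c))),
-- so the pyGetD/getD defaults are unreachable
def checkLoop (a1 a2 : List String) : List Int → Bool
  | [] => true
  | i :: rest =>
    let res1 := |((PySem.Int.ofStr? (PySem.List.pyGetD a1 i "")).getD 0) -
                 ((PySem.Int.ofStr? (PySem.List.pyGetD a1 (i-1) "")).getD 0)|
    let res2 := |((PySem.Int.ofStr? (PySem.List.pyGetD a2 i "")).getD 0) -
                 ((PySem.Int.ofStr? (PySem.List.pyGetD a2 (i-1) "")).getD 0)|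
    if res2 ≠ res1 then false else checkLoop a1 a2 rest

def check (s : String) : Bool :=
  let reversed_s := (PySem.Str.slice? s none none (-1)).getD ""   -- s[::-1]
  let a1 := s.toList.map (fun c => PySem.Int.toStr (c.toNat : Int))
  let a2 := reversed_s.toList.map (fun c => PySem.Int.toStr (c.toNat : Int))
  checkLoop a1 a2 (PySem.List.pyRange 1 a1.length 1)

-- ===== PORT B =====
-- the 'while i < j' two-pointer loop; inside the loop every index is in range,
-- so the pyGetD default ' ' is unreachable
def altLoop (l : List Char) (i j : Int) : Bool :=
  if i < j then
    if |((PySem.List.pyGetD l (i+1) ' ').toNat : Int) - ((PySem.List.pyGetD l i ' ').toNat : Int)| ≠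
       |((PySem.List.pyGetD l j ' ').toNat : Int) - ((PySem.List.pyGetD l (j-1) ' ').toNat : Int)| then
      false
    else altLoop l (i+1) (j-1)
  else true
termination_by (j - i).toNat
decreasing_by omega

def check_alt (s : String) : Bool :=
  altLoop s.toList 0 ((s.toList.length : Int) - 1)

-- ===== PRECONDITION & SPEC =====
def Spec_check (s : String) (out : Bool) : Prop := out = check_alt s
instance (s : String) (out : Bool) : Decidable (Spec_check s out) := by unfold Spec_check; infer_instance

-- ===== CLAIM (what is proved, stated in full; the proofs are below) =====
def Claim_equal_check : Prop := ∀ (s : String), Dom_check s → Spec_check s (check s)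

-- ===== LEMMAS AND PROOFS =====

-- int(str(n)) = n for the character codes the domain admits (n ≤ 126)
theorem rt_small : ∀ n < 127, PySem.Int.ofStr? (PySem.Int.toStr ((n : Nat) : Int)) = some ((n : Nat) : Int) := by
  decide

-- A's early-return loop is List.all of the per-index comparison
theorem checkLoop_all (a1 a2 : List String) (is : List Int) :
    checkLoop a1 a2 is = is.all (fun i =>
      (|((PySem.Int.ofStr? (PySem.List.pyGetD a2 i "")).getD 0) -
        ((PySem.Int.ofStr? (PySem.List.pyGetD a2 (i-1) "")).getD 0)|) ==
      (|((PySem.Int.ofStr? (PySem.List.pyGetD a1 i "")).getD 0) -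
        ((PySem.Int.ofStr? (PySem.List.pyGetD a1 (i-1) "")).getD 0)|)) := by
  induction is with
  | nil => rfl
  | cons i rest ih =>
    simp only [checkLoop, List.all_cons, ih]
    split_ifs with h
    · simp [h]
    · simp [not_not.mp h]

-- proof-free indexing: the code of l[k] (blank past the end), Nat index
def cval (l : List Char) (k : Nat) : Int := (((l[k]?).getD ' ').toNat : Int)

-- the adjacent difference at Nat position k
def dv (l : List Char) (k : Nat) : Int := |cval l (k+1) - cval l k|

theorem cval_eq (l : List Char) (k : Nat) (h : k < l.length) : cval l k = ((l[k]'h).toNat : Int) := by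
  simp [cval, List.getElem?_eq_getElem h]

theorem cval_reverse (l : List Char) (k : Nat) (h : k < l.length) :
    cval l.reverse k = cval l (l.length - 1 - k) := by
  rw [cval_eq l.reverse k (by simpa using h), List.getElem_reverse,
      cval_eq l _ (by omega)]

-- what one a1[i]/a2[i] str(ord)/int round trip evaluates to
theorem pyVal (l : List Char) (hc : ∀ c ∈ l, c.toNat < 127) (j : Nat) (hj : j < l.length) :
    ((PySem.Int.ofStr? (PySem.List.pyGetD
        (l.map (fun c => PySem.Int.toStr (c.toNat : Int))) (j : Int) "")).getD 0)
      = ((l[j]'hj).toNat : Int) := by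
  rw [PySem.List.pyGetD_natCast]
  rw [List.getD_eq_getElem _ _ (by simpa using hj)]
  simp only [List.getElem_map]
  rw [rt_small _ (hc _ (l.getElem_mem hj))]
  rfl

theorem pyVal' (l : List Char) (hc : ∀ c ∈ l, c.toNat < 127) (j : Nat) (hj : j < l.length) :
    ((PySem.Int.ofStr? (PySem.List.pyGetD
        (l.map (fun c => PySem.Int.toStr (c.toNat : Int))) (j : Int) "")).getD 0)
      = cval l j := by
  rw [pyVal l hc j hj, cval_eq l j hj]

-- characterisation of A's result: the full mirror condition on adjacent differences
theorem A_char (l : List Char) (hc : ∀ c ∈ l, c.toNat < 127) :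
    checkLoop (l.map (fun c => PySem.Int.toStr (c.toNat : Int)))
        (l.reverse.map (fun c => PySem.Int.toStr (c.toNat : Int)))
        (PySem.List.pyRange 1 ((l.map (fun c => PySem.Int.toStr (c.toNat : Int))).length : Int) 1)
      = true ↔ (∀ j : Nat, j + 1 < l.length → dv l j = dv l (l.length - 2 - j)) := by
  have hc' : ∀ c ∈ l.reverse, c.toNat < 127 := by simpa using hc
  rw [checkLoop_all]
  simp only [List.all_eq_true, beq_iff_eq, List.length_map]
  have hres1 : ∀ (j : Nat), j + 1 < l.length →
      (|((PySem.Int.ofStr? (PySem.List.pyGetD (l.map (fun c => PySem.Int.toStr (c.toNat : Int))) ((j:Int)+1) "")).getD 0) -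
        ((PySem.Int.ofStr? (PySem.List.pyGetD (l.map (fun c => PySem.Int.toStr (c.toNat : Int))) (((j:Int)+1)-1) "")).getD 0)|)
      = dv l j := by
    intro j hj
    have e1 : ((j:Int)+1) - 1 = ((j:Nat) : Int) := by ring
    have e2 : ((j:Int)+1) = (((j+1 : Nat)) : Int) := by push_cast; ring
    rw [e1, e2, pyVal' l hc (j+1) hj, pyVal' l hc j (by omega)]
    rfl
  have hres2 : ∀ (j : Nat), j + 1 < l.length →
      (|((PySem.Int.ofStr? (PySem.List.pyGetD (l.reverse.map (fun c => PySem.Int.toStr (c.toNat : Int))) ((j:Int)+1) "")).getD 0) -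
        ((PySem.Int.ofStr? (PySem.List.pyGetD (l.reverse.map (fun c => PySem.Int.toStr (c.toNat : Int))) (((j:Int)+1)-1) "")).getD 0)|)
      = dv l (l.length - 2 - j) := by
    intro j hj
    have e1 : ((j:Int)+1) - 1 = ((j:Nat) : Int) := by ring
    have e2 : ((j:Int)+1) = (((j+1 : Nat)) : Int) := by push_cast; ring
    rw [e1, e2, pyVal' l.reverse hc' (j+1) (by simpa using hj),
        pyVal' l.reverse hc' j (by simp; omega),
        cval_reverse l (j+1) hj, cval_reverse l j (by omega)]
    have e3 : l.length - 1 - (j+1) = l.length - 2 - j := by omega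
    have e4 : l.length - 1 - j = (l.length - 2 - j) + 1 := by omega
    rw [e3, e4, dv, abs_sub_comm]
  constructor
  · intro h j hj
    have hmem : ((j:Int)+1) ∈ PySem.List.pyRange 1 (l.length : Int) 1 := by
      rw [PySem.List.mem_pyRange_one]
      constructor <;> [omega; exact_mod_cast (by omega : (j:Int) + 1 < (l.length : Int))]
    have hh := h _ hmem
    rw [hres1 j hj, hres2 j hj] at hh
    exact hh.symm
  · intro h i hi
    rw [PySem.List.mem_pyRange_one] at hi
    obtain ⟨h1, h2⟩ := hi
    obtain ⟨j, rfl⟩ : ∃ j : Nat, i = (j:Int) + 1 := ⟨(i-1).toNat, by omega⟩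
    have hj : j + 1 < l.length := by exact_mod_cast (by omega : (j:Int)+1 < (l.length:Int))
    rw [hres1 j hj, hres2 j hj]
    exact (h j hj).symm

-- Int-indexed character code / adjacent difference (as B's loop computes them)
def cvB (l : List Char) (k : Int) : Int := ((PySem.List.pyGetD l k ' ').toNat : Int)
def dvB (l : List Char) (k : Int) : Int := |cvB l (k+1) - cvB l k|

theorem cvB_natCast (l : List Char) (k : Nat) : cvB l (k : Int) = cval l k := by
  simp [cvB, cval, PySem.List.pyGetD_natCast, List.getD]

theorem dvB_natCast (l : List Char) (k : Nat) : dvB l (k : Int) = dv l k := by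
  have e : ((k : Int) + 1) = ((k + 1 : Nat) : Int) := by push_cast; ring
  rw [dvB, dv, e, cvB_natCast, cvB_natCast]

-- characterisation of B's two-pointer loop: the mirror condition over the first half
theorem altLoop_iff (l : List Char) : ∀ (n : Nat) (i j : Int), (j - i).toNat = n →
    (altLoop l i j = true ↔ ∀ k : Int, i ≤ k → 2*k < i + j → dvB l k = dvB l (i + j - 1 - k)) := by
  intro n
  induction n using Nat.strong_induction_on with
  | _ n ih =>
    intro i j hn
    rw [altLoop]
    by_cases hij : i < j
    · simp only [if_pos hij]
      have hrec := ih (j - 1 - (i + 1)).toNat (by omega) (i+1) (j-1) rfl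
      have hL : |((PySem.List.pyGetD l (i+1) ' ').toNat : Int) - ((PySem.List.pyGetD l i ' ').toNat : Int)|
          = dvB l i := rfl
      have hR : |((PySem.List.pyGetD l j ' ').toNat : Int) - ((PySem.List.pyGetD l (j-1) ' ').toNat : Int)|
          = dvB l (j-1) := by
        have e : j - 1 + 1 = j := by ring
        rw [dvB, cvB, cvB, e]
      rw [hL, hR]
      split_ifs with hcond
      · simp only [false_iff]
        intro hAll
        have := hAll i le_rfl (by omega)
        rw [(show i + j - 1 - i = j - 1 by ring)] at this
        exact hcond this
      · have hEq : dvB l i = dvB l (j-1) := not_not.mp hcond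
        rw [hrec]
        constructor
        · intro h k hk hk2
          rcases eq_or_lt_of_le hk with rfl | hk'
          · rw [(show i + j - 1 - i = j - 1 by ring)]
            exact hEq
          · have := h k (by omega) (by omega)
            rwa [(show i + 1 + (j - 1) - 1 - k = i + j - 1 - k by ring)] at this
        · intro h k hk hk2
          have := h k (by omega) (by omega)
          rw [(show i + 1 + (j - 1) - 1 - k = i + j - 1 - k by ring)]
          exact this
    · simp only [if_neg hij, true_iff]
      intro k hk hk2
      omega

-- the half condition at (0, length-1) equals the full condition
theorem half_eq_full (l : List Char) :
    (∀ k : Int, 0 ≤ k → 2*k < 0 + ((l.length : Int) - 1) → dvB l k = dvB l (0 + ((l.length : Int) - 1) - 1 - k))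
      ↔ (∀ j : Nat, j + 1 < l.length → dv l j = dv l (l.length - 2 - j)) := by
  constructor
  · intro h j hj
    by_cases hhalf : 2*j < l.length - 1
    · have := h (j : Int) (by positivity) (by omega)
      have e : 0 + ((l.length : Int) - 1) - 1 - (j:Int) = ((l.length - 2 - j : Nat) : Int) := by
        omega
      rw [e, dvB_natCast, dvB_natCast] at this
      exact this
    · -- mirror: apply the half condition at j' = length - 2 - j
      set j' := l.length - 2 - j with hj'
      have hj'2 : 2*j' < l.length - 1 := by omega
      have := h (j' : Int) (by positivity) (by omega)
      have e : 0 + ((l.length : Int) - 1) - 1 - (j':Int) = ((l.length - 2 - j' : Nat) : Int) := by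
        omega
      rw [e, dvB_natCast, dvB_natCast] at this
      have ej : l.length - 2 - j' = j := by omega
      rw [ej] at this
      exact this.symm
  · intro h k hk hk2
    obtain ⟨j, rfl⟩ : ∃ j : Nat, k = (j : Int) := ⟨k.toNat, by omega⟩
    have hj : j + 1 < l.length := by
      have : 2 * (j:Int) < (l.length : Int) - 1 := by omega
      omega
    have := h j hj
    have e : 0 + ((l.length : Int) - 1) - 1 - (j:Int) = ((l.length - 2 - j : Nat) : Int) := by
      omega
    rw [e, dvB_natCast, dvB_natCast]
    exact this

-- ===== VERDICT (by name: the statement is the Claim_ definition above) =====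
theorem check_spec : Claim_equal_check := by
  intro s hdom
  replace hdom : s.toList.all pvDomChar = true := hdom
  have hc : ∀ c ∈ s.toList, c.toNat < 127 := by
    intro c hcmem
    have := List.all_eq_true.mp hdom c hcmem
    simp only [pvDomChar, Bool.or_eq_true, Bool.and_eq_true, decide_eq_true_eq, beq_iff_eq] at this
    omega
  show check s = check_alt s
  unfold check check_alt
  rw [PySem.Str.slice?_none_none_neg_one]
  simp only [Option.getD_some, String.toList_ofList]
  rw [Bool.eq_iff_iff, A_char s.toList hc,
      altLoop_iff s.toList _ 0 ((s.toList.length : Int) - 1) rfl]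
  exact (half_eq_full s.toList).symm
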